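-- pv_equiv track=rewrite | github.com/MaryamEbr/CSC2511_A2 | alaki.py | count_last_character_repeats
-- ===== SOURCE A (Python) =====
-- def count_last_character_repeats(s: str, ch: str) -> int:
--     """Return the number of times the character ch appears at the END of the
--     string s.
--
--     Precondition: len(ch) == 1
--
--     >>> count_last_character_repeats("buzz", "z")
--     2
--     >>> count_last_character_repeats("buzzz", "z")
--     3
--     >>> # TODO: (1) Add example that demonstrates that current function body
--     >>> #           is incorrect.
--     >>>count_last_character_repeats("buzaz", "z")
--     1
--     """
--
--     # TODO: (2) Modify the function body to make it correct.
--
--     count_ch = 0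
--     i = len(s) - 1
--     while i >= 0:
--         if ch == s[i]:
--             count_ch = count_ch + 1
--             i = i - 1
--         else:
--             return count_ch
--
--     return count_ch
-- ===== SOURCE B (Python) =====
-- def count_last_character_repeats(s: str, ch: str) -> int:
--     """Closed form: rstrip removes exactly the trailing run of ch
--     (ch a single character), so the length difference is the count."""
--     return len(s) - len(s.rstrip(ch))
-- ===== Notes on version B (the rewrite author's own statement) =====
-- stated objective: simpler
-- what changed: Replaces the reverse-scanning while-loop with index and accumulator by the closed form len(s) - len(s.rstrip(ch)).
-- outside the precondition, e.g. on count_last_character_repeats('cab', 'ab'): A returns 0, B returns 2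
import Mathlib
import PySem

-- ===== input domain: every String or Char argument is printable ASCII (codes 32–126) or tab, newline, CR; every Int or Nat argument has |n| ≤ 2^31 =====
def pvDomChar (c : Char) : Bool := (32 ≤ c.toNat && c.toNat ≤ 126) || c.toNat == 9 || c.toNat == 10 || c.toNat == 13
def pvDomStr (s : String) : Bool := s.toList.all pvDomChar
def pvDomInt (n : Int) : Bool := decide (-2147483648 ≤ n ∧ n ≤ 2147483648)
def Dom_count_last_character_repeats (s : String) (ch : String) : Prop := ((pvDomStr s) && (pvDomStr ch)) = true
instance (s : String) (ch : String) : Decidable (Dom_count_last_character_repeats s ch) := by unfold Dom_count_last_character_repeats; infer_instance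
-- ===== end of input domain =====

-- B replaces A's reverse-scanning while-loop with the closed form len(s) - len(s.rstrip(ch)) (simpler).


-- ===== PORT A =====
-- while i ≥ 0: compare ch with the one-character string s[i]; fuel n = i + 1, so i = n - 1.
def clcrLoop (s : List Char) (ch : List Char) : Nat → Int → Int
  | 0, count => count
  | n + 1, count =>
    match PySem.List.pyGet? s (n : Int) with
    | some c => if ch == [c] then clcrLoop s ch n (count + 1) else count
    | none => count  -- unreachable: 0 ≤ n < s.length whenever the loop is entered

def count_last_character_repeats (s : String) (ch : String) : Int :=
  clcrLoop s.toList ch.toList s.toList.length 0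

-- ===== PORT B =====
-- hand port of str.rstrip(chars) (chars ≠ None): drop trailing characters belonging to the set; exact.
def clcrRstrip (cs : List Char) (chars : List Char) : List Char :=
  ((cs.reverse.dropWhile (fun c => chars.contains c)).reverse)

def count_last_character_repeats_alt (s : String) (ch : String) : Int :=
  (s.toList.length : Int) - (clcrRstrip s.toList ch.toList).length

-- ===== PRECONDITION & SPEC =====
-- Pre_ admits every single-character ch (the documented contract, len(ch)==1, plus the empty ch) and
-- also any longer ch whose character set does not contain the last character of s (there both return 0);
-- it excludes only multi-character ch that touches the end of s, where rstrip's character-set reading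
-- diverges from A's never-matching one-character comparison — an unspecified corner of A's contract.
def Pre_count_last_character_repeats (s : String) (ch : String) : Prop :=
  ch.toList.length ≤ 1 ∨ ∀ c ∈ s.toList.getLast?, c ∉ ch.toList
instance (s : String) (ch : String) : Decidable (Pre_count_last_character_repeats s ch) := by unfold Pre_count_last_character_repeats; infer_instance
def pvWitness_count_last_character_repeats : String × String := ("buzz", "z")

def Spec_count_last_character_repeats (s : String) (ch : String) (out : Int) : Prop := out = count_last_character_repeats_alt s ch
instance (s : String) (ch : String) (out : Int) : Decidable (Spec_count_last_character_repeats s ch out) := by unfold Spec_count_last_character_repeats; infer_instance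

-- ===== CLAIM (what is proved, stated in full; the proofs are below) =====
def Claim_equal_count_last_character_repeats : Prop := ∀ (s : String) (ch : String), Dom_count_last_character_repeats s ch → Pre_count_last_character_repeats s ch → Spec_count_last_character_repeats s ch (count_last_character_repeats s ch)

-- ===== LEMMAS AND PROOFS =====

-- A's loop counts the trailing run of ch among the first n characters.
theorem clcrLoop_eq (s ch : List Char) (n : Nat) (hn : n ≤ s.length) (count : Int) :
    clcrLoop s ch n count = count + ((s.take n).reverse.takeWhile (fun c => ch == [c])).length := by
  induction n generalizing count with
  | zero => simp [clcrLoop]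
  | succ m ih =>
    have hm : m < s.length := by omega
    have hget : PySem.List.pyGet? s ((m : Nat) : Int) = some s[m] :=
      PySem.List.pyGet?_ofNat s m hm
    have htake : (s.take (m + 1)).reverse = s[m] :: (s.take m).reverse := by
      rw [List.take_add_one, List.getElem?_eq_getElem hm]
      simp
    rw [clcrLoop, hget, htake, List.takeWhile_cons]
    cases hb : (ch == [s[m]]) with
    | true =>
      simp only [hb, if_true, ih (by omega)]
      simp
      omega
    | false =>
      simp [hb]

theorem clcr_pred_eq (c0 : Char) :
    (fun c => ([c0] : List Char) == [c]) = (fun c => ([c0] : List Char).contains c) := by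
  funext c
  by_cases h : c0 = c
  · subst h; simp
  · simp [h, Ne.symm h]

theorem count_last_character_repeats_spec : Claim_equal_count_last_character_repeats := by
  intro s ch _ hpre
  unfold Spec_count_last_character_repeats count_last_character_repeats count_last_character_repeats_alt clcrRstrip
  have hloop := clcrLoop_eq s.toList ch.toList s.toList.length le_rfl 0
  rw [List.take_length] at hloop
  rw [hloop]
  by_cases hlen : ch.toList.length ≤ 1
  · have hsplit :
        (s.toList.reverse.takeWhile (fun c => ch.toList == [c])).length
          + (s.toList.reverse.dropWhile (fun c => ch.toList.contains c)).length
          = s.toList.length := by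
      cases hch : ch.toList with
      | nil =>
        have h1 : (s.toList.reverse.takeWhile (fun c => ([] : List Char) == [c])) = [] := by
          cases s.toList.reverse with
          | nil => rfl
          | cons a l => simp
        have h2 : (s.toList.reverse.dropWhile (fun c => ([] : List Char).contains c)) = s.toList.reverse := by
          cases s.toList.reverse with
          | nil => rfl
          | cons a l => simp
        rw [h1, h2]
        simp
      | cons c0 tl =>
        have htl : tl = [] := by
          rw [hch] at hlen
          simpa using hlen
        subst htl
        rw [clcr_pred_eq c0]
        have hlen2 := congrArg List.length
          (List.takeWhile_append_dropWhile (p := fun c => ([c0] : List Char).contains c) (l := s.toList.reverse))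
        rw [List.length_append, List.length_reverse] at hlen2
        omega
    simp only [List.length_reverse]
    omega
  · have h2 : ∀ c ∈ s.toList.getLast?, c ∉ ch.toList := hpre.resolve_left hlen
    have hpfalse : ∀ c, (ch.toList == [c]) = false := by
      intro c
      cases hch : ch.toList with
      | nil => rw [hch] at hlen; simp at hlen
      | cons a tl =>
        cases tl with
        | nil => rw [hch] at hlen; simp at hlen
        | cons b tl2 => simp
    have htW : s.toList.reverse.takeWhile (fun c => ch.toList == [c]) = [] := by
      cases s.toList.reverse with
      | nil => rfl
      | cons a l => simp [hpfalse]
    have hdW : s.toList.reverse.dropWhile (fun c => ch.toList.contains c) = s.toList.reverse := by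
      cases hrev : s.toList.reverse with
      | nil => rfl
      | cons a l =>
        have hga : s.toList.getLast? = some a := by
          rw [← List.head?_reverse, hrev]
          rfl
        have hmem : a ∉ ch.toList := h2 a (by rw [hga]; rfl)
        simp [hmem]
    rw [htW, hdW]
    simp
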